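-- pv_equiv track=rewrite | github.com/BlockWorksCo/Playground | FusEd/Span.py | RemoveGaps
-- ===== SOURCE A (Python) =====
-- def RemoveGaps(spans):
--
--     for i in range(len(spans)-1):
--
--         s0,e0,t0    = spans[i]
--         s1,e1,t1    = spans[i+1]
--
--         if e0 != s1:
--             width   = e1-s1
--             s1      = e0
--             e1      = s1+width
--
--         spans[i+1]  = (s1,e1,t1)
--
--     return spans
-- ===== SOURCE B (Python) =====
-- def RemoveGaps(spans):
--     # Builds a fresh list (A mutates its argument in place; return value is the same).
--     if not spans:
--         return spans
--     out = [spans[0]]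
--     pos = spans[0][1]
--     for s, e, t in spans[1:]:
--         w = e - s
--         out.append((pos, pos + w, t))
--         pos += w
--     return out
-- ===== Notes on version B (the rewrite author's own statement) =====
-- stated objective: simpler
-- what changed: B threads a running end-position accumulator over a single pass building a fresh list, instead of A's index loop re-reading the previous (already rewritten) element with a redundant gap test; the unconditional reassignment provably yields the same tuple when there is no gap. A mutates its argument in place, B does not; the return value is identical.
import Mathlib
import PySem

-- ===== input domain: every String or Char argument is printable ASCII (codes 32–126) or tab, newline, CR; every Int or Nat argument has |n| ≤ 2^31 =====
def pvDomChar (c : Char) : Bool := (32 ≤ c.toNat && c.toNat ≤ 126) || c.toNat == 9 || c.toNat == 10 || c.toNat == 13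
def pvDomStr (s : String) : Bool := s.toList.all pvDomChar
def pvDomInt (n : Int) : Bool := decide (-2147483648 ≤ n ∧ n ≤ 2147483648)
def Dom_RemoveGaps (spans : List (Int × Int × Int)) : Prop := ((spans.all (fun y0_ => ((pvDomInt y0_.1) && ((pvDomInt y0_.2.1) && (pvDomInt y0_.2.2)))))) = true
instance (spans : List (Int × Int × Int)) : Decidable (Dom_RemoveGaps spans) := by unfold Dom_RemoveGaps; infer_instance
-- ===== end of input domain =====

-- B replaces A's index loop (re-reading the previous, already rewritten element and testing for a gap)
-- by one pass threading a running end-position accumulator; equivalence is about the RETURN value only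
-- (A mutates its argument in place, B builds a fresh list).

-- ===== PORT A =====
-- loop body of A's for-loop: reads spans[i], spans[i+1], shifts if there is a gap, writes spans[i+1]
def pvStepA (acc : List (Int × Int × Int)) (i : Int) : List (Int × Int × Int) :=
  -- s0,e0,t0 = spans[i];  s1,e1,t1 = spans[i+1]  (indices always in range in A)
  let p0 := (PySem.List.pyGet? acc i).getD (0, 0, 0)
  let p1 := (PySem.List.pyGet? acc (i + 1)).getD (0, 0, 0)
  -- if e0 != s1: width = e1-s1; s1 = e0; e1 = s1+width
  let q : Int × Int :=
    if p0.2.1 ≠ p1.1 then (p0.2.1, p0.2.1 + (p1.2.1 - p1.1)) else (p1.1, p1.2.1)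
  -- spans[i+1] = (s1,e1,t1)
  acc.set (i + 1).toNat (q.1, q.2, p1.2.2)

def RemoveGaps (spans : List (Int × Int × Int)) : List (Int × Int × Int) :=
  (PySem.List.pyRange 0 ((spans.length : Int) - 1) 1).foldl pvStepA spans

-- ===== PORT B =====
def shiftSpans (pos : Int) : List (Int × Int × Int) → List (Int × Int × Int)
  | [] => []
  | (s, e, t) :: rest => (pos, pos + (e - s), t) :: shiftSpans (pos + (e - s)) rest

def RemoveGaps_alt (spans : List (Int × Int × Int)) : List (Int × Int × Int) :=
  match spans with
  | [] => []
  | first :: rest => first :: shiftSpans first.2.1 rest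

-- ===== PRECONDITION & SPEC =====
def Spec_RemoveGaps (spans : List (Int × Int × Int)) (out : List (Int × Int × Int)) : Prop := out = RemoveGaps_alt spans
instance (spans : List (Int × Int × Int)) (out : List (Int × Int × Int)) : Decidable (Spec_RemoveGaps spans out) := by unfold Spec_RemoveGaps; infer_instance

-- ===== CLAIM (what is proved, stated in full; the proofs are below) =====
def Claim_equal_RemoveGaps : Prop := ∀ (spans : List (Int × Int × Int)), Dom_RemoveGaps spans → Spec_RemoveGaps spans (RemoveGaps spans)

-- ===== LEMMAS AND PROOFS =====

-- Invariant of A's loop: with the already-processed prefix p (nonempty, last end = pos) in place,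
-- folding A's step over the remaining indices shifts the suffix exactly like shiftSpans.
theorem fold_shift (l : List (Int × Int × Int)) :
    ∀ (p : List (Int × Int × Int)) (pos : Int), (∃ ls lt, p.getLast? = some (ls, pos, lt)) →
    (PySem.List.pyRange ((p.length : Int) - 1) (((p.length : Int) - 1) + l.length) 1).foldl
      pvStepA (p ++ l) = p ++ shiftSpans pos l := by
  induction l with
  | nil =>
      intro p pos h
      rw [PySem.List.pyRange_one_eq_nil (by simp)]
      simp [shiftSpans]
  | cons x tl ih =>
      intro p pos h
      obtain ⟨ls, lt, hlast⟩ := h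
      obtain ⟨s, e, t⟩ := x
      have hpne : p ≠ [] := by rintro rfl; simp at hlast
      have hm : 1 ≤ p.length := List.length_pos_of_ne_nil hpne
      have hlt : ((p.length : Int) - 1) < ((p.length : Int) - 1) + ((s, e, t) :: tl).length := by
        simp
      rw [PySem.List.pyRange_one_cons hlt, List.foldl_cons]
      -- evaluate one step of A's loop
      have hcast : ((p.length : Int) - 1) = ((p.length - 1 : Nat) : Int) := by omega
      have hget0 : (PySem.List.pyGet? (p ++ (s, e, t) :: tl) ((p.length : Int) - 1)) = some (ls, pos, lt) := by
        rw [hcast, PySem.List.pyGet?_natCast]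
        rw [List.getElem?_append_left (by omega)]
        rw [List.getLast?_eq_getElem?] at hlast
        exact hlast
      have hget1 : (PySem.List.pyGet? (p ++ (s, e, t) :: tl) (((p.length : Int) - 1) + 1)) = some (s, e, t) := by
        have hc : ((p.length : Int) - 1) + 1 = ((p.length : Nat) : Int) := by omega
        rw [hc, PySem.List.pyGet?_natCast]
        simp
      have hset : (((p.length : Int) - 1) + 1).toNat = p.length := by omega
      have hstep : pvStepA (p ++ (s, e, t) :: tl) ((p.length : Int) - 1)
          = (p ++ [(pos, pos + (e - s), t)]) ++ tl := by
        unfold pvStepA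
        simp only [hget0, hget1, hset, Option.getD_some]
        rw [List.set_append_right _ _ (by omega)]
        have h0 : p.length - p.length = 0 := by omega
        rw [h0]
        by_cases hps : pos = s
        · subst hps
          simp [List.set]
        · simp [List.set, hps]
      rw [hstep]
      have hrange : PySem.List.pyRange (((p.length : Int) - 1) + 1)
            (((p.length : Int) - 1) + (((s, e, t) :: tl).length : Int)) 1
          = PySem.List.pyRange (((p ++ [((pos : Int), pos + (e - s), t)]).length : Int) - 1)
            ((((p ++ [((pos : Int), pos + (e - s), t)]).length : Int) - 1) + (tl.length : Int)) 1 := by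
        simp only [List.length_append, List.length_cons, List.length_nil]
        norm_num
      rw [hrange, ih (p ++ [(pos, pos + (e - s), t)]) (pos + (e - s)) ⟨pos, t, by simp⟩]
      simp [shiftSpans]

-- ===== VERDICT (by name: the statement is the Claim_ definition above) =====
theorem RemoveGaps_spec : Claim_equal_RemoveGaps := by
  intro spans _
  unfold Spec_RemoveGaps RemoveGaps RemoveGaps_alt
  cases spans with
  | nil => simp [PySem.List.pyRange_one_eq_nil]
  | cons first rest =>
      obtain ⟨s, e, t⟩ := first
      have h := fold_shift rest [(s, e, t)] e ⟨s, t, rfl⟩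
      have hrange : PySem.List.pyRange 0 (((((s, e, t) :: rest).length : Int)) - 1) 1
          = PySem.List.pyRange ((([((s : Int), e, t)] : List (Int × Int × Int)).length : Int) - 1)
            (((([((s : Int), e, t)] : List (Int × Int × Int)).length : Int) - 1) + (rest.length : Int)) 1 := by
        simp only [List.length_cons, List.length_nil]
        norm_num
      rw [hrange]
      simpa using h
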